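-- pv_equiv track=rewrite | github.com/ChengZi1314/shipmanager | users/templatetags/paginate_tags.py | get_left
-- ===== SOURCE A (Python) =====
-- def get_left(current_page, left, num_pages):
--     # 辅助函数，获取当前页码的值的左边两个页码值，要注意一些细节，比如不够两个
--     # 那么最左取到2，为了方便处理，包含当前页码值，比如当前页码值为5，
--     # 那么pages = [3,4,5]
--     if current_page == 1:
--         return []
--     elif current_page == num_pages:
--         l = [i - 1 for i in range(current_page, current_page - left, -1)
--              if i - 1 > 1]
--         l.sort()  # python 中的sort函数是内部函数，将l原地排序
--         return l
--     l = [i for i in range(current_page, current_page - left, -1) if i > 1]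
--     l.sort()
--     return l
-- ===== SOURCE B (Python) =====
-- def get_left(current_page, left, num_pages):
--     # closed-form window bounds instead of descending scan + filter + sort
--     if current_page == 1:
--         return []
--     if current_page == num_pages:
--         return list(range(max(2, current_page - left), current_page))
--     return list(range(max(2, current_page - left + 1), current_page + 1))
-- ===== Notes on version B (the rewrite author's own statement) =====
-- stated objective: simpler
-- what changed: Replaced the descending range scan with a filter comprehension followed by an in-place sort by a single closed-form ascending range whose lower endpoint is clamped at 2.
import Mathlib
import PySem

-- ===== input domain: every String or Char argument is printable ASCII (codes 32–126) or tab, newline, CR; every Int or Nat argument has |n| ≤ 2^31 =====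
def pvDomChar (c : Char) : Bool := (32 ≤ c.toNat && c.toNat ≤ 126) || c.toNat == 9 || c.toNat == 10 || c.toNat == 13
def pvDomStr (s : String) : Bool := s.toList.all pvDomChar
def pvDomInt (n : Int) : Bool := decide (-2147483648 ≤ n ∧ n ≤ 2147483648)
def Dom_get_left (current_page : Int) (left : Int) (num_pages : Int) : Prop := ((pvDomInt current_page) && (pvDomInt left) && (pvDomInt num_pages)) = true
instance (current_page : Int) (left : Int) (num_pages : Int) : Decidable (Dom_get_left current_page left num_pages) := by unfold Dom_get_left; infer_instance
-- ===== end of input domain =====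

-- B replaces A's descending scan + filter + .sort() by the closed-form ascending range
-- with its endpoints clamped at 2 (objective: simpler; same return value everywhere).

-- ===== PORT A =====
def get_left (current_page : Int) (left : Int) (num_pages : Int) : List Int :=
  if current_page == 1 then []
  else if current_page == num_pages then
    let l := ((PySem.List.pyRange current_page (current_page - left) (-1)).filter
                (fun i => decide (1 < i - 1))).map (fun i => i - 1)
    PySem.List.sorted l (fun x => x) false
  else
    let l := (PySem.List.pyRange current_page (current_page - left) (-1)).filter
                (fun i => decide (1 < i))
    PySem.List.sorted l (fun x => x) false

-- ===== PORT B =====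
def get_left_alt (current_page : Int) (left : Int) (num_pages : Int) : List Int :=
  if current_page == 1 then []
  else if current_page == num_pages then
    PySem.List.pyRange (max 2 (current_page - left)) current_page 1
  else
    PySem.List.pyRange (max 2 (current_page - left + 1)) (current_page + 1) 1

-- ===== PRECONDITION & SPEC =====
def Spec_get_left (current_page : Int) (left : Int) (num_pages : Int) (out : List Int) : Prop := out = get_left_alt current_page left num_pages
instance (current_page : Int) (left : Int) (num_pages : Int) (out : List Int) : Decidable (Spec_get_left current_page left num_pages out) := by unfold Spec_get_left; infer_instance

-- ===== CLAIM (what is proved, stated in full; the proofs are below) =====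
def Claim_equal_get_left : Prop := ∀ (current_page : Int) (left : Int) (num_pages : Int), Dom_get_left current_page left num_pages → Spec_get_left current_page left num_pages (get_left current_page left num_pages)

-- ===== LEMMAS AND PROOFS =====

-- filtering the ascending range by (1 < ·) clamps its lower end at 2
theorem filter_gt_one_pyRange (a b : Int) :
    (PySem.List.pyRange a b 1).filter (fun i => decide (1 < i))
      = PySem.List.pyRange (max 2 a) b 1 := by
  generalize hn : (b - a).toNat = n
  induction n generalizing a with
  | zero =>
    rw [PySem.List.pyRange_one_eq_nil (by omega), PySem.List.pyRange_one_eq_nil (by omega)]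
    rfl
  | succ n ih =>
    have hab : a < b := by omega
    rw [PySem.List.pyRange_one_cons hab, List.filter_cons]
    by_cases h2 : 2 ≤ a
    · rw [if_pos (by simp; omega), ih (a + 1) (by omega)]
      rw [show max 2 a = a by omega, PySem.List.pyRange_one_cons hab,
          show max 2 (a + 1) = a + 1 by omega]
    · rw [if_neg (by simp; omega), ih (a + 1) (by omega),
          show max 2 (a + 1) = max 2 a by omega]

-- shifting the ascending range down by 1
theorem map_sub_one_pyRange (a b : Int) :
    (PySem.List.pyRange a b 1).map (fun i => i - 1)
      = PySem.List.pyRange (a - 1) (b - 1) 1 := by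
  rw [PySem.List.pyRange_one, PySem.List.pyRange_one, List.map_map]
  rw [show (b - 1 - (a - 1)).toNat = (b - a).toNat by omega]
  apply List.map_congr_left
  intro k _
  simp; omega

-- sorting (with identity key) a reversed strictly increasing list returns the list itself
theorem sorted_reverse_eq (ys : List Int) (h : ys.Pairwise (· < ·)) :
    PySem.List.sorted ys.reverse (fun x => x) false = ys :=
  PySem.List.sorted_eq_of_perm_of_pairwise_lt _ _ _ (List.reverse_perm ys).symm h

-- A's elif branch (current_page == num_pages) equals B's closed-form range
theorem elif_branch (cp l : Int) :
    PySem.List.sorted (((PySem.List.pyRange cp (cp - l) (-1)).filter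
        (fun i => decide (1 < i - 1))).map (fun i => i - 1)) (fun x => x) false
      = PySem.List.pyRange (max 2 (cp - l)) cp 1 := by
  have hy : ((PySem.List.pyRange (cp - l + 1) (cp + 1) 1).filter
        (fun i => decide (1 < i - 1))).map (fun i => i - 1)
      = PySem.List.pyRange (max 2 (cp - l)) cp 1 := by
    rw [show ((PySem.List.pyRange (cp - l + 1) (cp + 1) 1).filter
          (fun i => decide (1 < i - 1))).map (fun i => i - 1)
        = ((PySem.List.pyRange (cp - l + 1) (cp + 1) 1).map (fun i => i - 1)).filter
          (fun i => decide (1 < i)) by rw [List.filter_map]; rfl]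
    rw [map_sub_one_pyRange, filter_gt_one_pyRange]
    congr 1 <;> omega
  rw [PySem.List.pyRange_neg_one_eq_reverse, List.filter_reverse, List.map_reverse, hy]
  exact sorted_reverse_eq _ (PySem.List.pairwise_lt_pyRange_one _ _)

-- A's general branch equals B's closed-form range
theorem else_branch (cp l : Int) :
    PySem.List.sorted ((PySem.List.pyRange cp (cp - l) (-1)).filter
        (fun i => decide (1 < i))) (fun x => x) false
      = PySem.List.pyRange (max 2 (cp - l + 1)) (cp + 1) 1 := by
  rw [PySem.List.pyRange_neg_one_eq_reverse, List.filter_reverse, filter_gt_one_pyRange]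
  exact sorted_reverse_eq _ (PySem.List.pairwise_lt_pyRange_one _ _)

-- ===== VERDICT (by name: the statement is the Claim_ definition above) =====
theorem get_left_spec : Claim_equal_get_left := by
  intro cp left np _
  show get_left cp left np = get_left_alt cp left np
  unfold get_left get_left_alt
  by_cases h1 : cp = 1
  · simp [h1]
  · by_cases h2 : cp = np
    · simp [h2, elif_branch]
    · simp [h1, h2, else_branch]
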